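-- pv_equiv track=rewrite | github.com/BradleySmall/advent | day_3/main.py | path_to_pairs
-- ===== SOURCE A (Python) =====
-- def path_to_pairs(cur, path):
--     """Convert path into list of pairs."""
--     direction = path[0]
--     extent = int(path[1:])
--
--     pairs = []
--     for _ in range(extent):
--         if direction == 'L':
--             cur[0] -= 1
--         elif direction == 'R':
--             cur[0] += 1
--         elif direction == 'U':
--             cur[1] += 1
--         elif direction == 'D':
--             cur[1] -= 1
--         pairs.append((cur[0], cur[1]))
--     return pairs
-- ===== SOURCE B (Python) =====
-- def _step_vector(direction):
--     if direction == 'L':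
--         return (-1, 0)
--     if direction == 'R':
--         return (1, 0)
--     if direction == 'U':
--         return (0, 1)
--     if direction == 'D':
--         return (0, -1)
--     return (0, 0)
--
--
-- def path_to_pairs(cur, path):
--     """Convert path into list of pairs (closed-form per index, no running accumulator)."""
--     dx, dy = _step_vector(path[0])
--     extent = int(path[1:])
--     if extent <= 0:
--         return []
--     sx, sy = cur[0], cur[1]
--     cur[0] = sx + dx * extent
--     cur[1] = sy + dy * extent
--     return [(sx + dx * (i + 1), sy + dy * (i + 1)) for i in range(extent)]
-- ===== Notes on version B (the rewrite author's own statement) =====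
-- stated objective: alternative
-- what changed: B replaces A's per-step in-place mutation of cur with an accumulator list by a single step vector and a closed-form per-index comprehension (point i = start + vector*(i+1)), updating cur once at the end.
import Mathlib
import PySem

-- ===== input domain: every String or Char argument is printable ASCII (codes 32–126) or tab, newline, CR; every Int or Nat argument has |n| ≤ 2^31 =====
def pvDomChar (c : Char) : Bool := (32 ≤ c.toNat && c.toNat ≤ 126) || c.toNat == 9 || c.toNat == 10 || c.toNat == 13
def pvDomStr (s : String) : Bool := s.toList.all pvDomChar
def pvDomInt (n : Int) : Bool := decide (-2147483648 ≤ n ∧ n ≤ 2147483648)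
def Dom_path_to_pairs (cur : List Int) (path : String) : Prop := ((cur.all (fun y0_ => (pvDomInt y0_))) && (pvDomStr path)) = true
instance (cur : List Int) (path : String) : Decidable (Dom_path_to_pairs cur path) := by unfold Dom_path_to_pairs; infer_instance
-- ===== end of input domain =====

-- B replaces A's running in-place accumulator loop by a closed-form per-index
-- comprehension from a step vector (equivalence is about the RETURN value; both
-- Pythons leave `cur` with the same observable contents).

-- ===== PORT A =====
def path_to_pairs (cur : List Int) (path : String) : List (Int × Int) :=
  let direction := PySem.Str.pyGet? path 0
  let extent := (PySem.Int.ofChars? (path.toList.drop 1)).getD 0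
  let r := (PySem.List.pyRange 0 extent 1).foldl
    (fun (st : List Int × List (Int × Int)) _ =>
      let c := st.1
      let c :=
        if direction = some 'L' then c.set 0 (c.getD 0 0 - 1)
        else if direction = some 'R' then c.set 0 (c.getD 0 0 + 1)
        else if direction = some 'U' then c.set 1 (c.getD 1 0 + 1)
        else if direction = some 'D' then c.set 1 (c.getD 1 0 - 1)
        else c
      (c, st.2 ++ [(c.getD 0 0, c.getD 1 0)]))
    (cur, [])
  r.2

-- ===== PORT B =====
def pvStepVector (d : Option Char) : Int × Int :=
  if d = some 'L' then (-1, 0)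
  else if d = some 'R' then (1, 0)
  else if d = some 'U' then (0, 1)
  else if d = some 'D' then (0, -1)
  else (0, 0)

def path_to_pairs_alt (cur : List Int) (path : String) : List (Int × Int) :=
  let v := pvStepVector (PySem.Str.pyGet? path 0)
  let extent := (PySem.Int.ofChars? (path.toList.drop 1)).getD 0
  if extent ≤ 0 then []
  else
    let sx := cur.getD 0 0
    let sy := cur.getD 1 0
    (List.range extent.toNat).map (fun (i : Nat) => (sx + v.1 * ((i : Int) + 1), sy + v.2 * ((i : Int) + 1)))

-- ===== PRECONDITION & SPEC =====
-- Pre_ excludes exactly the inputs where A raises: empty path (IndexError),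
-- path[1:] not an int literal (ValueError), and extent > 0 with len(cur) < 2 (IndexError).
def Pre_path_to_pairs (cur : List Int) (path : String) : Prop :=
  path.toList ≠ [] ∧
  (PySem.Int.ofChars? (path.toList.drop 1)).isSome = true ∧
  (0 < (PySem.Int.ofChars? (path.toList.drop 1)).getD 0 → 2 ≤ cur.length)
instance (cur : List Int) (path : String) : Decidable (Pre_path_to_pairs cur path) := by
  unfold Pre_path_to_pairs; infer_instance

def pvWitness_path_to_pairs : List Int × String := ([0, 0], "R2")

def Spec_path_to_pairs (cur : List Int) (path : String) (out : List (Int × Int)) : Prop := out = path_to_pairs_alt cur path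
instance (cur : List Int) (path : String) (out : List (Int × Int)) : Decidable (Spec_path_to_pairs cur path out) := by unfold Spec_path_to_pairs; infer_instance

-- ===== CLAIM (what is proved, stated in full; the proofs are below) =====
def Claim_equal_path_to_pairs : Prop := ∀ (cur : List Int) (path : String), Dom_path_to_pairs cur path → Pre_path_to_pairs cur path → Spec_path_to_pairs cur path (path_to_pairs cur path)

-- ===== LEMMAS AND PROOFS =====

lemma pv_loop (d : Option Char) (n : Nat) (x y : Int) (rest : List Int) (acc : List (Int × Int)) :
    (List.range n).foldl
      (fun (st : List Int × List (Int × Int)) _ =>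
        let c := st.1
        let c :=
          if d = some 'L' then c.set 0 (c.getD 0 0 - 1)
          else if d = some 'R' then c.set 0 (c.getD 0 0 + 1)
          else if d = some 'U' then c.set 1 (c.getD 1 0 + 1)
          else if d = some 'D' then c.set 1 (c.getD 1 0 - 1)
          else c
        (c, st.2 ++ [(c.getD 0 0, c.getD 1 0)]))
      (x :: y :: rest, acc)
    = ((x + (pvStepVector d).1 * n) :: (y + (pvStepVector d).2 * n) :: rest,
       acc ++ (List.range n).map (fun (i : Nat) =>
         (x + (pvStepVector d).1 * ((i : Int) + 1), y + (pvStepVector d).2 * ((i : Int) + 1)))) := by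
  induction n with
  | zero => simp
  | succ k ih =>
    rw [List.range_succ, List.foldl_append, ih, List.map_append]
    by_cases h1 : d = some 'L'
    · simp [pvStepVector, h1]; ring
    · by_cases h2 : d = some 'R'
      · simp [pvStepVector, h2]; ring
      · by_cases h3 : d = some 'U'
        · simp [pvStepVector, h3]; ring
        · by_cases h4 : d = some 'D'
          · simp [pvStepVector, h4]; ring
          · simp [pvStepVector, h1, h2, h3, h4]

-- ===== VERDICT (by name: the statement is the Claim_ definition above) =====
theorem path_to_pairs_spec : Claim_equal_path_to_pairs := by
  intro cur path _ hpre
  obtain ⟨hne, hsome, hlen⟩ := hpre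
  unfold Spec_path_to_pairs path_to_pairs path_to_pairs_alt
  obtain ⟨e, he⟩ := Option.isSome_iff_exists.mp hsome
  rw [he]
  by_cases hpos : (e : Int) ≤ 0
  · simp [PySem.List.pyRange_one_eq_nil hpos, hpos]
  · rw [not_le] at hpos
    have hlen2 : 2 ≤ cur.length := hlen (by rw [he]; simpa using hpos)
    match cur, hlen2 with
    | x :: y :: rest, _ =>
      simp only [Option.getD_some, if_neg (not_le.mpr hpos)]
      rw [PySem.List.pyRange_one, List.foldl_map]
      simp only [Int.sub_zero]
      rw [pv_loop (PySem.Str.pyGet? path 0) e.toNat x y rest []]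
      simp
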